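-- pv_equiv track=rewrite | github.com/edoardottt/offensive-onos | detection/log-analysis/analyze.py | clean_cap_distribution_children
-- ===== SOURCE A (Python) =====
-- mal_app = True  # The new application is the one under test
--
-- def clean_cap_distribution_children(cap_distribution):
--     """
--     >deprecated<
--     This function returns a distribution of CAP sequences
--     without duplicates.
--     e.g.: 'idjv' is a child of 'idjvzo' if mal_app is True
--     e.g.: 'idjv' is a child of 'zoidjv' if mal_app is False
--     """
--     result = {}
--     children = set()
--     for elem in cap_distribution.keys():
--         for elem2 in cap_distribution.keys():
--             if mal_app:
--                 if (
--                     elem != elem2 and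
--                     len(elem) < len(elem2) and
--                     elem2[:len(elem)] == elem
--                 ):
--                     children.add(elem)
--             else:
--                 if (
--                     elem != elem2 and
--                     len(elem) < len(elem2) and
--                     elem2[len(elem2)-len(elem):] == elem
--                 ):
--                     children.add(elem)
--
--     for k,v in cap_distribution.items():
--         if k not in children:
--             result[k] = v
--     return result
-- ===== SOURCE B (Python) =====
-- mal_app = True  # The new application is the one under test
--
--
-- def clean_cap_distribution_children(cap_distribution):
--     # Build the set of all proper prefixes (or suffixes, if not mal_app) of
--     # every key once; a key is a child iff it appears in that set.
--     children = set()
--     for k in cap_distribution.keys():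
--         if mal_app:
--             for i in range(len(k)):
--                 children.add(k[:i])
--         else:
--             for i in range(len(k)):
--                 children.add(k[len(k) - i:])
--     return {k: v for k, v in cap_distribution.items() if k not in children}
-- ===== Notes on version B (the rewrite author's own statement) =====
-- stated objective: faster
-- what changed: Instead of comparing every key against every other key, B builds one set of all proper prefixes of all keys in a single pass and keeps an entry iff its key is not in that set.
import Mathlib
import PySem

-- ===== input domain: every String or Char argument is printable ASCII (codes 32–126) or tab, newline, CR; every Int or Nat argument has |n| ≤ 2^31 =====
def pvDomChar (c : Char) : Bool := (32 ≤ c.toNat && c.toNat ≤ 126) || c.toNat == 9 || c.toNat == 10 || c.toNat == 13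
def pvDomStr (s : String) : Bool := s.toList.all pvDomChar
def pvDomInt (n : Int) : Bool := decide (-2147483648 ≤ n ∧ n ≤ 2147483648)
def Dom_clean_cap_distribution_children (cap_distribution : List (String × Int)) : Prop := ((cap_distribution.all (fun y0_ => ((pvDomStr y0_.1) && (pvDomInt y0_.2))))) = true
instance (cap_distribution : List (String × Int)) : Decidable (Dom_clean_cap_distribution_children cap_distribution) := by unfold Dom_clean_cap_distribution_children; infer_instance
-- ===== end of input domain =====

-- B replaces A's all-pairs key comparison by one set holding every proper prefix of every
-- key, built in a single pass (objective: faster).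

def mal_app : Bool := true  -- module constant from Source A

-- ===== PORT A =====
-- A's 'children' set: double loop over the keys, adding 'elem' whenever it is a strict
-- prefix (or, with mal_app false, strict suffix) of another key 'elem2'
def pvChildrenA (keys : List String) : PySem.Set String :=
  keys.foldl (fun ch elem =>
    keys.foldl (fun ch elem2 =>
      if mal_app then
        if elem ≠ elem2 ∧ PySem.Str.len elem < PySem.Str.len elem2 ∧
            PySem.Str.slice elem2 none (some (PySem.Str.len elem)) = elem
        then PySem.Set.add ch elem else ch
      else
        if elem ≠ elem2 ∧ PySem.Str.len elem < PySem.Str.len elem2 ∧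
            PySem.Str.slice elem2 (some (PySem.Str.len elem2 - PySem.Str.len elem)) none = elem
        then PySem.Set.add ch elem else ch) ch)
    PySem.Set.empty

-- literal transliteration of A: the double loop above, then the result dict rebuilt
-- from the entries whose key is not a child
def clean_cap_distribution_children (cap_distribution : List (String × Int)) : List (String × Int) :=
  (cap_distribution.foldl (fun r kv =>
      if ¬ PySem.Set.contains (pvChildrenA (cap_distribution.map Prod.fst)) kv.1
      then r.insert kv.1 kv.2 else r)
    PySem.Dict.empty).items

-- ===== PORT B =====
-- B's 'children' set: one pass adding every proper prefix k[:i] (suffix k[len(k)-i:]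
-- in the mal_app-false branch) of every key k
def pvChildrenB (cap_distribution : List (String × Int)) : PySem.Set String :=
  cap_distribution.foldl (fun ch kv =>
    if mal_app then
      (PySem.List.pyRange 0 (PySem.Str.len kv.1) 1).foldl
        (fun ch i => PySem.Set.add ch (PySem.Str.slice kv.1 none (some i))) ch
    else
      (PySem.List.pyRange 0 (PySem.Str.len kv.1) 1).foldl
        (fun ch i => PySem.Set.add ch (PySem.Str.slice kv.1 (some (PySem.Str.len kv.1 - i)) none)) ch)
    PySem.Set.empty

-- transliteration of Source B: the prefix set above, then the dict comprehension keeping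
-- the entries whose key is not in it
def clean_cap_distribution_children_alt (cap_distribution : List (String × Int)) : List (String × Int) :=
  (cap_distribution.foldl (fun r kv =>
      if ¬ PySem.Set.contains (pvChildrenB cap_distribution) kv.1
      then r.insert kv.1 kv.2 else r)
    PySem.Dict.empty).items

-- ===== PRECONDITION & SPEC =====
-- Pre_ excludes association lists with duplicate keys: they do not represent a Python
-- dict, which is what A receives (a dict's keys are always distinct).
def Pre_clean_cap_distribution_children (cap_distribution : List (String × Int)) : Prop :=
  (cap_distribution.map Prod.fst).Nodup
instance (cap_distribution : List (String × Int)) : Decidable (Pre_clean_cap_distribution_children cap_distribution) := by unfold Pre_clean_cap_distribution_children; infer_instance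

def pvWitness_clean_cap_distribution_children : (List (String × Int)) :=
  [("idjv", 3), ("idjvzo", 1), ("zo", 2)]

def Spec_clean_cap_distribution_children (cap_distribution : List (String × Int)) (out : List (String × Int)) : Prop := out = clean_cap_distribution_children_alt cap_distribution
instance (cap_distribution : List (String × Int)) (out : List (String × Int)) : Decidable (Spec_clean_cap_distribution_children cap_distribution out) := by unfold Spec_clean_cap_distribution_children; infer_instance

-- ===== CLAIM (what is proved, stated in full; the proofs are below) =====
def Claim_equal_clean_cap_distribution_children : Prop := ∀ (cap_distribution : List (String × Int)), Dom_clean_cap_distribution_children cap_distribution → Pre_clean_cap_distribution_children cap_distribution → Spec_clean_cap_distribution_children cap_distribution (clean_cap_distribution_children cap_distribution)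

-- ===== LEMMAS AND PROOFS =====

-- membership in a fold that only ever adds elements, from a per-step characterisation
theorem pv_mem_foldl_iff {α β : Type} (g : List α → β → List α) (Q : β → α → Prop)
    (hg : ∀ s e x, x ∈ g s e ↔ x ∈ s ∨ Q e x) :
    ∀ (l : List β) (s0 : List α) (x : α), x ∈ l.foldl g s0 ↔ x ∈ s0 ∨ ∃ e ∈ l, Q e x := by
  intro l
  induction l with
  | nil => simp
  | cons b t ih =>
    intro s0 x
    simp only [List.foldl_cons, ih, hg, List.mem_cons]
    constructor
    · rintro ((h | h) | ⟨e, he, hq⟩)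
      · exact Or.inl h
      · exact Or.inr ⟨b, Or.inl rfl, h⟩
      · exact Or.inr ⟨e, Or.inr he, hq⟩
    · rintro (h | ⟨e, (rfl | he), hq⟩)
      · exact Or.inl (Or.inl h)
      · exact Or.inl (Or.inr hq)
      · exact Or.inr ⟨e, he, hq⟩

-- A's child condition on a pair of keys
def pvCondA (k m : String) : Prop :=
  k ≠ m ∧ PySem.Str.len k < PySem.Str.len m ∧
    PySem.Str.slice m none (some (PySem.Str.len k)) = k

theorem pv_slice_toList (m : String) (i : Int) (h0 : 0 ≤ i) :
    (PySem.Str.slice m none (some i)).toList = m.toList.take i.toNat := by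
  rw [PySem.Str.toList_slice, PySem.Chars.slice_eq_listSlice, PySem.List.slice_to _ h0]

theorem pv_len_slice (m : String) (i : Int) (h0 : 0 ≤ i) (hi : i < PySem.Str.len m) :
    PySem.Str.len (PySem.Str.slice m none (some i)) = i := by
  rw [PySem.Str.len_eq] at *
  rw [pv_slice_toList m i h0]
  simp only [List.length_take]
  omega

-- A's condition ⟺ k is one of the proper prefixes B collects from m
theorem pv_condA_iff (k m : String) :
    pvCondA k m ↔ ∃ i : Int, (0 ≤ i ∧ i < PySem.Str.len m) ∧ k = PySem.Str.slice m none (some i) := by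
  unfold pvCondA
  constructor
  · rintro ⟨hne, hlt, hsl⟩
    exact ⟨PySem.Str.len k, ⟨by rw [PySem.Str.len_eq]; exact Int.natCast_nonneg _, hlt⟩, hsl.symm⟩
  · rintro ⟨i, ⟨h0, hi⟩, rfl⟩
    have hlenk : PySem.Str.len (PySem.Str.slice m none (some i)) = i := pv_len_slice m i h0 hi
    refine ⟨?_, by rw [hlenk]; exact hi, by rw [hlenk]⟩
    intro h
    have h2 := congrArg PySem.Str.len h
    rw [hlenk] at h2
    omega

-- the inner loop of A's double loop
theorem pv_mem_innerA (keys : List String) (elem : String) (s : PySem.Set String) (x : String) :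
    x ∈ keys.foldl (fun ch elem2 =>
      if mal_app then
        if elem ≠ elem2 ∧ PySem.Str.len elem < PySem.Str.len elem2 ∧
            PySem.Str.slice elem2 none (some (PySem.Str.len elem)) = elem
        then PySem.Set.add ch elem else ch
      else
        if elem ≠ elem2 ∧ PySem.Str.len elem < PySem.Str.len elem2 ∧
            PySem.Str.slice elem2 (some (PySem.Str.len elem2 - PySem.Str.len elem)) none = elem
        then PySem.Set.add ch elem else ch) s
    ↔ x ∈ s ∨ ((∃ m ∈ keys, pvCondA elem m) ∧ x = elem) := by
  rw [pv_mem_foldl_iff _ (fun m z => pvCondA elem m ∧ z = elem) ?_ keys s x]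
  · tauto
  · intro s' m y
    simp only [mal_app, if_true]
    split_ifs with h
    · rw [PySem.Set.mem_add]
      unfold pvCondA
      tauto
    · unfold pvCondA
      tauto

-- membership in A's children set
theorem pv_mem_childrenA (keys : List String) (x : String) :
    x ∈ pvChildrenA keys ↔ ∃ e ∈ keys, (∃ m ∈ keys, pvCondA e m) ∧ x = e := by
  unfold pvChildrenA
  rw [pv_mem_foldl_iff _ (fun e z => (∃ m ∈ keys, pvCondA e m) ∧ z = e)
        (fun s e y => pv_mem_innerA keys e s y) keys PySem.Set.empty x]
  simp [PySem.Set.empty]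

-- the inner loop of B
theorem pv_mem_innerB (k : String) (s : PySem.Set String) (x : String) :
    x ∈ (PySem.List.pyRange 0 (PySem.Str.len k) 1).foldl
        (fun ch i => PySem.Set.add ch (PySem.Str.slice k none (some i))) s
    ↔ x ∈ s ∨ ∃ i : Int, (0 ≤ i ∧ i < PySem.Str.len k) ∧ x = PySem.Str.slice k none (some i) := by
  rw [pv_mem_foldl_iff _ (fun i z => z = PySem.Str.slice k none (some i))
        (fun s' i y => PySem.Set.mem_add s' _ y) _ s x]
  simp only [PySem.List.mem_pyRange_one]

-- membership in B's prefix set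
theorem pv_mem_childrenB (cd : List (String × Int)) (x : String) :
    x ∈ pvChildrenB cd
    ↔ ∃ kv ∈ cd, ∃ i : Int, (0 ≤ i ∧ i < PySem.Str.len kv.1) ∧ x = PySem.Str.slice kv.1 none (some i) := by
  unfold pvChildrenB
  rw [pv_mem_foldl_iff _
        (fun kv z => ∃ i : Int, (0 ≤ i ∧ i < PySem.Str.len kv.1) ∧ z = PySem.Str.slice kv.1 none (some i))
        ?_ cd PySem.Set.empty x]
  · simp [PySem.Set.empty]
  · intro s kv y
    simp only [mal_app, if_true]
    exact pv_mem_innerB kv.1 s y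

-- a conditional dict-building loop over distinct keys is a filter
theorem pv_items_cond_fold (cd : List (String × Int)) (q : (String × Int) → Prop)
    [DecidablePred q] (h : (cd.map Prod.fst).Nodup) :
    (cd.foldl (fun r kv => if q kv then r.insert kv.1 kv.2 else r) PySem.Dict.empty).items
      = cd.filter (fun kv => decide (q kv)) := by
  have h1 : cd.foldl (fun r kv => if q kv then r.insert kv.1 kv.2 else r) PySem.Dict.empty
      = (cd.filter (fun kv => decide (q kv))).foldl (fun r kv => r.insert kv.1 kv.2) PySem.Dict.empty := by
    rw [List.foldl_filter]
    simp
  rw [h1, PySem.Dict.items_foldl_insert_fresh _ Prod.fst Prod.snd PySem.Dict.empty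
        (fun a _ => by simp) (List.Nodup.sublist (List.Sublist.map Prod.fst List.filter_sublist) h)]
  simp [PySem.Dict.empty]

-- ===== VERDICT (by name: the statement is the Claim_ definition above) =====
theorem clean_cap_distribution_children_spec : Claim_equal_clean_cap_distribution_children := by
  intro cd _ hpre
  unfold Spec_clean_cap_distribution_children
  unfold clean_cap_distribution_children clean_cap_distribution_children_alt
  rw [pv_items_cond_fold cd _ hpre, pv_items_cond_fold cd _ hpre]
  apply List.filter_congr
  intro kv hkv
  simp only [decide_eq_decide]
  rw [not_iff_not]
  have hk1 : kv.1 ∈ cd.map Prod.fst := List.mem_map_of_mem hkv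
  rw [PySem.Set.contains_iff, PySem.Set.contains_iff, pv_mem_childrenA, pv_mem_childrenB]
  constructor
  · rintro ⟨e, he, ⟨m, hm, hc⟩, rfl⟩
    obtain ⟨kv', hkv', rfl⟩ := List.mem_map.mp hm
    exact ⟨kv', hkv', (pv_condA_iff _ _).mp hc⟩
  · rintro ⟨kv', hkv', i, hi, hx⟩
    exact ⟨kv.1, hk1, ⟨kv'.1, List.mem_map_of_mem hkv', (pv_condA_iff _ _).mpr ⟨i, hi, hx⟩⟩, rfl⟩
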